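-- pv_equiv track=rewrite | github.com/Inoquek/ubs-cc2026-flask-app-copy1 | routes/operation_safeguard.py | challenge4_calc
-- ===== SOURCE A (Python) =====
-- def challenge4_calc(result1, result2, result3) :
--     def caesar_shift(text, shift):
--         result = []
--         for ch in text:
--             if 'A' <= ch <= 'Z':
--                 result.append(chr((ord(ch) - ord('A') + shift) % 26 + ord('A')))
--             elif 'a' <= ch <= 'z':
--                 result.append(chr((ord(ch) - ord('a') + shift) % 26 + ord('a')))
--             else:
--                 result.append(ch)
--         return ''.join(result)
--
--     def vigenere_decrypt(text, key):
--         result = []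
--         key = key.upper()
--         ki = 0
--         for ch in text:
--             if ch.isalpha():
--                 base = 'A' if ch.isupper() else 'a'
--                 k = ord(key[ki % len(key)]) - ord('A')
--                 result.append(chr((ord(ch) - ord(base) - k) % 26 + ord(base)))
--                 ki += 1
--             else:
--                 result.append(ch)
--         return ''.join(result)
--
--     # Step 1: Caesar shift backwards by in2
--     step1 = caesar_shift(result1, -result2)
--     # Step 2: Vigenère decryption with key in3
--     plaintext = vigenere_decrypt(step1, result3)
--     return plaintext
-- ===== SOURCE B (Python) =====
-- def challenge4_calc(result1, result2, result3):
--     # Fused single pass: undo Caesar(result2) and Vigenere(result3) together.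
--     key = result3.upper()
--     out = []
--     ki = 0
--     for ch in result1:
--         if 'A' <= ch <= 'Z' or 'a' <= ch <= 'z':
--             base = ord('A') if ch <= 'Z' else ord('a')
--             k = ord(key[ki % len(key)]) - ord('A')
--             out.append(chr((ord(ch) - base - result2 - k) % 26 + base))
--             ki += 1
--         else:
--             out.append(ch)
--     return ''.join(out)
-- ===== Notes on version B (the rewrite author's own statement) =====
-- stated objective: simpler
-- what changed: Fuses A's two passes (Caesar un-shift producing an intermediate string, then Vigenere decryption) into a single pass that subtracts both shifts at once with a running key index, eliminating the intermediate string.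
import Mathlib
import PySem

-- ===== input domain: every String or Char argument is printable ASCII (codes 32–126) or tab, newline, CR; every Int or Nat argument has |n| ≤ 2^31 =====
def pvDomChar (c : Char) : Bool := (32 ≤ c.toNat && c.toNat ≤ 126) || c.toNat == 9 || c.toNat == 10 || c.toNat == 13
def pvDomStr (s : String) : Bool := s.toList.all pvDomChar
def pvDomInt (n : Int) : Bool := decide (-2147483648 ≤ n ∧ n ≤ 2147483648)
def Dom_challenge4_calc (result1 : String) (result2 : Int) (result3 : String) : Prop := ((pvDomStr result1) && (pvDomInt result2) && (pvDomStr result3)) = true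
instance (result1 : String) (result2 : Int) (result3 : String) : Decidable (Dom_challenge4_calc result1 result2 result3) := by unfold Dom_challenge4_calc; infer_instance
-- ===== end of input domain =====

-- B fuses A's two passes (Caesar un-shift, then Vigenère decrypt) into a single pass with a
-- running key index; objective: simpler (one traversal, no intermediate string).

-- ===== PORT A =====
def pvCaesarGo (shift : Int) : List Char → List Char
  | [] => []
  | c :: cs =>
    (if 'A' ≤ c ∧ c ≤ 'Z' then
      Char.ofNat (PySem.Int.mod ((c.toNat : Int) - 65 + shift) 26 + 65).toNat
    else if 'a' ≤ c ∧ c ≤ 'z' then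
      Char.ofNat (PySem.Int.mod ((c.toNat : Int) - 97 + shift) 26 + 97).toNat
    else c) :: pvCaesarGo shift cs

def pvVigGo (key : List Char) (ki : Nat) : List Char → List Char
  | [] => []
  | c :: cs =>
    if PySem.Chars.isalpha c then
      let base : Int := if PySem.Chars.isupper c then 65 else 97
      let k : Int := ((key.getD (ki % key.length) 'A').toNat : Int) - 65
      Char.ofNat (PySem.Int.mod ((c.toNat : Int) - base - k) 26 + base).toNat ::
        pvVigGo key (ki + 1) cs
    else c :: pvVigGo key ki cs

def challenge4_calc (result1 : String) (result2 : Int) (result3 : String) : String :=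
  String.ofList (pvVigGo (PySem.Chars.upper result3.toList) 0 (pvCaesarGo (-result2) result1.toList))

-- ===== PORT B =====
-- single fused pass; same default read on an empty key as port A (that case is excluded by Pre_)
def pvFusedGo (shift : Int) (key : List Char) (ki : Nat) : List Char → List Char
  | [] => []
  | c :: cs =>
    if ('A' ≤ c ∧ c ≤ 'Z') ∨ ('a' ≤ c ∧ c ≤ 'z') then
      let base : Int := if c ≤ 'Z' then 65 else 97
      let k : Int := ((key.getD (ki % key.length) 'A').toNat : Int) - 65
      Char.ofNat (PySem.Int.mod ((c.toNat : Int) - base - shift - k) 26 + base).toNat ::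
        pvFusedGo shift key (ki + 1) cs
    else c :: pvFusedGo shift key ki cs


def challenge4_calc_alt (result1 : String) (result2 : Int) (result3 : String) : String :=
  String.ofList (pvFusedGo result2 (PySem.Chars.upper result3.toList) 0 result1.toList)

-- ===== PRECONDITION & SPEC =====
-- Pre_ excludes only the inputs on which A raises ZeroDivisionError (ki % len(key) with an
-- empty key): an empty result3 together with a result1 containing a letter.
def Pre_challenge4_calc (result1 : String) (result2 : Int) (result3 : String) : Prop :=
  result3.toList ≠ [] ∨ ∀ c ∈ result1.toList, PySem.Chars.isalpha c = false
instance (result1 : String) (result2 : Int) (result3 : String) : Decidable (Pre_challenge4_calc result1 result2 result3) := by unfold Pre_challenge4_calc; infer_instance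

def pvWitness_challenge4_calc : String × Int × String := ("Khoor, Zruog!", 3, "KEY")

def Spec_challenge4_calc (result1 : String) (result2 : Int) (result3 : String) (out : String) : Prop := out = challenge4_calc_alt result1 result2 result3
instance (result1 : String) (result2 : Int) (result3 : String) (out : String) : Decidable (Spec_challenge4_calc result1 result2 result3 out) := by unfold Spec_challenge4_calc; infer_instance

-- ===== CLAIM (what is proved, stated in full; the proofs are below) =====
def Claim_equal_challenge4_calc : Prop := ∀ (result1 : String) (result2 : Int) (result3 : String), Dom_challenge4_calc result1 result2 result3 → Pre_challenge4_calc result1 result2 result3 → Spec_challenge4_calc result1 result2 result3 (challenge4_calc result1 result2 result3)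

-- ===== LEMMAS AND PROOFS =====
-- the char-level facts and the fusion invariant hold for every input, so Pre_/Dom_ are not
-- needed below; Pre_ is there because Python A raises on an empty key (see above)
theorem pvChar_facts_upper (n : Nat) (h1 : 65 ≤ n) (h2 : n ≤ 90) :
    PySem.Chars.isalpha (Char.ofNat n) = true ∧ PySem.Chars.isupper (Char.ofNat n) = true ∧
      (Char.ofNat n).toNat = n := by
  have hv : n.isValidChar := Or.inl (by omega)
  have ht : (Char.ofNat n).toNat = n := by simp [Char.ofNat, hv, Char.toNat, Char.ofNatAux]
  have hle : ∀ a b : Char, (a ≤ b) = (a.toNat ≤ b.toNat) := fun a b => rfl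
  refine ⟨?_, ?_, ht⟩ <;>
    simp [PySem.Chars.isalpha, PySem.Chars.isupper, PySem.Chars.islower, hle, ht] <;> omega

theorem pvChar_facts_lower (n : Nat) (h1 : 97 ≤ n) (h2 : n ≤ 122) :
    PySem.Chars.isalpha (Char.ofNat n) = true ∧ PySem.Chars.isupper (Char.ofNat n) = false ∧
      (Char.ofNat n).toNat = n := by
  have hv : n.isValidChar := Or.inl (by omega)
  have ht : (Char.ofNat n).toNat = n := by simp [Char.ofNat, hv, Char.toNat, Char.ofNatAux]
  have hle : ∀ a b : Char, (a ≤ b) = (a.toNat ≤ b.toNat) := fun a b => rfl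
  refine ⟨?_, ?_, ht⟩ <;>
    simp [PySem.Chars.isalpha, PySem.Chars.isupper, PySem.Chars.islower, hle, ht] <;> omega

theorem pvFuse (shift : Int) (key : List Char) :
    ∀ (cs : List Char) (ki : Nat),
      pvVigGo key ki (pvCaesarGo (-shift) cs) = pvFusedGo shift key ki cs := by
  intro cs
  have hmod : ∀ a : Int, PySem.Int.mod a 26 = a % 26 := fun a =>
    PySem.Int.mod_eq_emod_of_pos (by norm_num)
  induction cs with
  | nil => intro ki; rfl
  | cons c cs ih =>
    intro ki
    by_cases hU : 'A' ≤ c ∧ c ≤ 'Z'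
    · have hU' : 65 ≤ c.toNat ∧ c.toNat ≤ 90 := hU
      simp only [pvCaesarGo, pvVigGo, pvFusedGo]
      rw [if_pos hU, if_pos (Or.inl hU), if_pos hU.2]
      set m : Int := PySem.Int.mod ((c.toNat : Int) - 65 + (-shift)) 26 + 65 with hm
      have hmb : 65 ≤ m ∧ m ≤ 90 := by rw [hm, hmod]; omega
      have hmn : ((m.toNat : Int)) = m := Int.toNat_of_nonneg (by omega)
      obtain ⟨ha, hu, htn⟩ := pvChar_facts_upper m.toNat (by omega) (by omega)
      rw [if_pos ha]
      simp only [hu, if_true, htn, hmn]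
      refine congrArg₂ _ ?_ (ih _)
      congr 1
      rw [hm]
      simp only [hmod]
      omega
    · by_cases hL : 'a' ≤ c ∧ c ≤ 'z'
      · have hL' : 97 ≤ c.toNat ∧ c.toNat ≤ 122 := hL
        have hU' : ¬ (65 ≤ c.toNat ∧ c.toNat ≤ 90) := hU
        simp only [pvCaesarGo, pvVigGo, pvFusedGo]
        rw [if_neg hU, if_pos hL, if_pos (Or.inr hL),
          if_neg (show ¬ c ≤ 'Z' from fun h => absurd (show c.toNat ≤ 90 from h) (by omega))]
        set m : Int := PySem.Int.mod ((c.toNat : Int) - 97 + (-shift)) 26 + 97 with hm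
        have hmb : 97 ≤ m ∧ m ≤ 122 := by rw [hm, hmod]; omega
        have hmn : ((m.toNat : Int)) = m := Int.toNat_of_nonneg (by omega)
        obtain ⟨ha, hu, htn⟩ := pvChar_facts_lower m.toNat (by omega) (by omega)
        rw [if_pos ha]
        simp only [hu, Bool.false_eq_true, if_false, htn, hmn]
        refine congrArg₂ _ ?_ (ih _)
        congr 1
        rw [hm]
        simp only [hmod]
        omega
      · have hU' : ¬ (65 ≤ c.toNat ∧ c.toNat ≤ 90) := hU
        have hL' : ¬ (97 ≤ c.toNat ∧ c.toNat ≤ 122) := hL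
        have ha : PySem.Chars.isalpha c = false := by
          simp only [PySem.Chars.isalpha, PySem.Chars.isupper, PySem.Chars.islower,
            Bool.or_eq_false_iff, Bool.and_eq_false_iff, decide_eq_false_iff_not]
          constructor
          · by_cases h : 'A' ≤ c
            · exact Or.inr (show ¬ c ≤ 'Z' from fun h2 => hU ⟨h, h2⟩)
            · exact Or.inl h
          · by_cases h : 'a' ≤ c
            · exact Or.inr (show ¬ c ≤ 'z' from fun h2 => hL ⟨h, h2⟩)
            · exact Or.inl h
        simp only [pvCaesarGo, pvVigGo, pvFusedGo]
        rw [if_neg hU, if_neg hL, if_neg (by simp [ha]),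
          if_neg (show ¬ (('A' ≤ c ∧ c ≤ 'Z') ∨ ('a' ≤ c ∧ c ≤ 'z')) from fun h => h.elim hU hL)]
        exact congrArg _ (ih _)

-- ===== VERDICT (by name: the statement is the Claim_ definition above) =====
theorem challenge4_calc_spec : Claim_equal_challenge4_calc := by
  intro r1 r2 r3 _ _
  unfold Spec_challenge4_calc challenge4_calc challenge4_calc_alt
  exact congrArg String.ofList (pvFuse r2 (PySem.Chars.upper r3.toList) r1.toList 0)
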